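-- pv_equiv track=rewrite | github.com/tony-728/Algorithm | python/programmers/Lev2/택배기사.py | solution
-- ===== SOURCE A (Python) =====
-- from collections import deque
--
-- def solution(order):
--     answer = 0
--
--     queue = deque()
--     order = deque(order)
--     len_order = len(order)
--
--     for i in range(1, len_order + 1):
--         if i == order[0]:
--             answer += 1
--             order.popleft()
--         else:
--             while queue and queue[-1] == order[0]:
--                 queue.pop()
--                 order.popleft()
--                 answer += 1
--             else:
--                 queue.append(i)
--     else:
--         while queue and queue[-1] == order[0]:
--             queue.pop()
--             order.popleft()
--             answer += 1
--
--     return answer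
-- ===== SOURCE B (Python) =====
-- def solution(order):
--     n = len(order)
--     stack = []
--     nxt = 1  # next box coming off the belt
--     answer = 0
--     for t in order:
--         if stack and stack[-1] == t:
--             stack.pop()
--             answer += 1
--         else:
--             while nxt <= n and nxt != t:
--                 stack.append(nxt)
--                 nxt += 1
--             if nxt > n:
--                 return answer
--             nxt += 1
--             answer += 1
--     return answer
-- ===== Notes on version B (the rewrite author's own statement) =====
-- stated objective: alternative
-- what changed: B iterates over the delivery targets, producing belt boxes on demand (push until the wanted box appears, or return when the belt is exhausted), instead of A's loop over incoming boxes with a nested pop-while after each arrival.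
import Mathlib
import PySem

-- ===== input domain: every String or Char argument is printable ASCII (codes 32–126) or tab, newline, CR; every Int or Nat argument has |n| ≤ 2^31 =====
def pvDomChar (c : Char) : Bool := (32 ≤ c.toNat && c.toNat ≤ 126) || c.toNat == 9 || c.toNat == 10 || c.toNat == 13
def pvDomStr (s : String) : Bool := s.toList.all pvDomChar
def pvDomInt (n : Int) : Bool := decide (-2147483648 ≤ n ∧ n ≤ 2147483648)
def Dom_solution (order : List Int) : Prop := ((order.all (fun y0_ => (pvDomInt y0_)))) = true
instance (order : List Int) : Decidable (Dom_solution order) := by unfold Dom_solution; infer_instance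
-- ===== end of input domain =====

-- B loops over delivery targets, producing boxes on demand, instead of A's loop over incoming
-- boxes with nested stack pops; same O(n) stack simulation, different decomposition (objective: alternative).


-- ===== PORT A =====
-- `queue` is represented with its TOP (python queue[-1]) as the list head, so
-- queue.append i = cons, queue.pop = tail.  `order` keeps python's deque order (head = order[0]).
-- the inner `while queue and queue[-1] == order[0]: pop/popleft/answer+=1`:
def popA : List Int → List Int → Int → (List Int × List Int × Int)
  | t :: qs, h :: os, a => if t = h then popA qs os (a + 1) else (t :: qs, h :: os, a)
  | q, o, a => (q, o, a)

-- the `for i in range(1, len_order+1)` loop, k = arrivals remaining, i = current arrival,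
-- followed by the final while (= popA again) and `return answer`.
-- (the `o = []` mid-loop branch: python's while guard sees the empty queue first and appends i;
--  a non-empty queue with empty order is unreachable from solution's initial state.)
def loopA : Nat → Int → List Int → List Int → Int → Int
  | 0, _, q, o, a => (popA q o a).2.2
  | k + 1, i, q, [], a => loopA k (i + 1) (i :: q) [] a
  | k + 1, i, q, h :: os, a =>
      if i = h then loopA k (i + 1) q os (a + 1)
      else
        let r := popA q (h :: os) a
        loopA k (i + 1) (i :: r.1) r.2.1 r.2.2

def solution (order : List Int) : Int := loopA order.length 1 [] order 0

-- ===== PORT B =====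
-- `while nxt <= n and nxt != t: push; nxt += 1` then the `nxt > n` test; fuel f = n - nxt + 1.
-- returns none when the belt is exhausted (python's `return answer`), else the state after
-- consuming box t: some (fuel', nxt', stack').
def produceB : Nat → Int → Int → List Int → Option (Nat × Int × List Int)
  | 0, _, _, _ => none
  | f + 1, nxt, t, st => if nxt = t then some (f, nxt + 1, st) else produceB f (nxt + 1) t (nxt :: st)

-- the `for t in order` loop (stack head = python stack[-1]).
def loopB : List Int → Int → Nat → List Int → Int → Int
  | [], _, _, _, a => a
  | t :: ts, nxt, f, st, a =>
      if st.head? = some t then loopB ts nxt f st.tail (a + 1)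
      else
        match produceB f nxt t st with
        | some (f', nxt', st') => loopB ts nxt' f' st' (a + 1)
        | none => a

def solution_alt (order : List Int) : Int := loopB order 1 order.length [] 0

-- ===== PRECONDITION & SPEC =====
def Spec_solution (order : List Int) (out : Int) : Prop := out = solution_alt order
instance (order : List Int) (out : Int) : Decidable (Spec_solution order out) := by unfold Spec_solution; infer_instance

-- ===== CLAIM (what is proved, stated in full; the proofs are below) =====
def Claim_equal_solution : Prop := ∀ (order : List Int), Dom_solution order → Spec_solution order (solution order)

-- ===== LEMMAS AND PROOFS =====

-- one matching pop step of A's inner while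
theorem popA_cons (t : Int) (qs os : List Int) (a : Int) :
    popA (t :: qs) (t :: os) a = popA qs os (a + 1) := by
  simp [popA]

-- the inner while stops when the stack top does not match (or one side is empty)
theorem popA_stop (q o : List Int) (a : Int)
    (h : ∀ t qs h' os, q = t :: qs → o = h' :: os → t ≠ h') :
    popA q o a = (q, o, a) := by
  cases q with
  | nil => cases o <;> simp [popA]
  | cons t qs =>
    cases o with
    | nil => simp [popA]
    | cons h' os => simp [popA, h t qs h' os rfl rfl]

-- with no targets left, A just pushes the remaining arrivals and returns the answer
theorem loopA_nil (k : Nat) (i : Int) (q : List Int) (a : Int) :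
    loopA k i q [] a = a := by
  induction k generalizing i q with
  | zero =>
    cases q with
    | nil => simp [loopA, popA]
    | cons t qs => simp [loopA, popA]
  | succ k ih => simp [loopA, ih]

-- delivering the matching stack top can be pulled out of A's loop, as long as every
-- stacked box number is smaller than the next arrival
theorem loopA_pop (k : Nat) (i t : Int) (qs ts : List Int) (a : Int)
    (ht : t < i) (hq : ∀ x ∈ qs, x < i) :
    loopA k i (t :: qs) (t :: ts) a = loopA k i qs ts (a + 1) := by
  induction k generalizing i t qs ts a with
  | zero => simp [loopA, popA_cons]
  | succ k ih =>
    have hit : ¬ i = t := by omega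
    cases ts with
    | nil =>
      have hstop : popA qs [] (a + 1) = (qs, [], a + 1) :=
        popA_stop _ _ _ (by intro _ _ _ _ _ h; cases h)
      simp [loopA, hit, popA_cons, hstop, loopA_nil]
    | cons t' ts' =>
      by_cases hit' : i = t'
      · subst hit'
        have hstop : popA qs (i :: ts') (a + 1) = (qs, i :: ts', a + 1) := by
          refine popA_stop _ _ _ ?_
          intro x xs y ys hx hy h'
          cases hy
          have := hq x (by rw [hx]; simp)
          omega
        have hih := ih (i + 1) i qs ts' (a + 1) (by omega)
          (by intro y hy; have := hq y hy; omega)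
        simp only [loopA, if_neg hit, popA_cons, hstop]
        rw [hih]
        norm_num
      · simp only [loopA, if_neg hit, popA_cons, if_neg hit']

-- main bisimulation: from a common state, the rest of A's run equals the rest of B's run
theorem loopAB (k : Nat) (i : Int) (q o : List Int) (a : Int)
    (hq : ∀ x ∈ q, x < i) :
    loopA k i q o a = loopB o i k q a := by
  cases o with
  | nil => simp [loopA_nil, loopB]
  | cons t ts =>
    by_cases htop : q.head? = some t
    · obtain ⟨qs, rfl⟩ : ∃ qs, q = t :: qs := by
        cases q with
        | nil => simp at htop
        | cons x xs => simp at htop; exact ⟨xs, by rw [htop]⟩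
      have ht : t < i := hq t (by simp)
      rw [loopA_pop k i t qs ts a ht (by intro y hy; exact hq y (by simp [hy]))]
      rw [loopAB k i qs ts (a + 1) (by intro y hy; exact hq y (by simp [hy]))]
      simp [loopB]
    · have hstop : popA q (t :: ts) a = (q, t :: ts, a) := by
        refine popA_stop _ _ _ ?_
        intro x xs y ys hx hy h'
        cases hy
        rw [hx] at htop
        simp at htop
        exact htop h'
      cases k with
      | zero =>
        simp [loopA, hstop, loopB, htop, produceB]
      | succ k =>
        by_cases hit : i = t
        · subst hit
          simp only [loopA]
          rw [loopAB k (i + 1) q ts (a + 1) (by intro y hy; have := hq y hy; omega)]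
          simp [loopB, htop, produceB]
        · simp only [loopA, if_neg hit, hstop]
          rw [loopAB k (i + 1) (i :: q) (t :: ts) a
            (by intro y hy; simp at hy; rcases hy with rfl | hy; omega; have := hq y hy; omega)]
          simp [loopB, htop, produceB, hit]
  termination_by k + o.length
  decreasing_by all_goals first | (simp; omega) | simp

-- ===== VERDICT (by name: the statement is the Claim_ definition above) =====
theorem solution_spec : Claim_equal_solution := by
  intro order _
  unfold Spec_solution solution solution_alt
  exact loopAB order.length 1 [] order 0 (by simp)
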